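-- pv_equiv track=rewrite | github.com/alrSasani/My_Scripts | P_interface_xmls.py | get_mult_coeffs
-- ===== SOURCE A (Python) =====
-- def str_mult(a,b):
--     my_list = [*a.split(),*b.split()]
--     my_list.sort()
--     return(' '.join(my_list))
--
-- def terms_mult(T_1,T_2):
--     T1T2 = {}
--     for i in T_1.keys():
--         for j in T_2.keys():
--             my_key = str_mult(i,j)
--             if my_key in T1T2.keys():
--                 T1T2[my_key] = T1T2[my_key]+ T_1[i]*T_2[j]
--             else:
--                 T1T2[my_key] = T_1[i]*T_2[j]
--     return(T1T2)
--
-- def get_pwr_N(T1,n):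
--     if n-1!=0:
--         return(terms_mult(get_pwr_N(T1,n-1),T1))
--     else:
--         return(T1)
--
-- def get_mult_coeffs(my_str_trms):
--     mult_terms = []
--     for i in range(len(my_str_trms)):
--         tem_dic = {}
--         for j in range(len(my_str_trms[i])):
--             if j ==0:
--                 tem_dic = get_pwr_N(my_str_trms[i][j][0],my_str_trms[i][j][1])
--             else:
--                 tem_dic = terms_mult(tem_dic,get_pwr_N(my_str_trms[i][j][0],my_str_trms[i][j][1]))
--         mult_terms.append(tem_dic)
--     return(mult_terms)
-- ===== SOURCE B (Python) =====
-- def _mul(T1, T2):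
--     # product phase: all pairwise terms in i-then-j order, then an aggregation fold
--     pairs = [(' '.join(sorted(a.split() + b.split())), u * v)
--              for a, u in T1.items() for b, v in T2.items()]
--     out = {}
--     for k, v in pairs:
--         out[k] = out.get(k, 0) + v
--     return out
--
--
-- def _pow(T1, n):
--     acc = T1
--     for _ in range(n - 1):
--         acc = _mul(acc, T1)
--     return acc
--
--
-- def get_mult_coeffs(my_str_trms):
--     result = []
--     for group in my_str_trms:
--         powers = [_pow(d, n) for d, n in group]
--         if powers:
--             acc = powers[0]
--             for p in powers[1:]:
--                 acc = _mul(acc, p)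
--         else:
--             acc = {}
--         result.append(acc)
--     return result
-- ===== Notes on version B (the rewrite author's own statement) =====
-- stated objective: alternative
-- what changed: Exponentiation becomes an explicit iterative accumulator instead of linear recursion, term multiplication is split into a pairwise-product list phase followed by an aggregation fold over items (no contains-branch, no per-key lookups into the operands), and each group is built by first materialising the list of powers and then folding multiplication over it; the left-to-right multiplication nesting and dict insertion order are preserved exactly.
import Mathlib
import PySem

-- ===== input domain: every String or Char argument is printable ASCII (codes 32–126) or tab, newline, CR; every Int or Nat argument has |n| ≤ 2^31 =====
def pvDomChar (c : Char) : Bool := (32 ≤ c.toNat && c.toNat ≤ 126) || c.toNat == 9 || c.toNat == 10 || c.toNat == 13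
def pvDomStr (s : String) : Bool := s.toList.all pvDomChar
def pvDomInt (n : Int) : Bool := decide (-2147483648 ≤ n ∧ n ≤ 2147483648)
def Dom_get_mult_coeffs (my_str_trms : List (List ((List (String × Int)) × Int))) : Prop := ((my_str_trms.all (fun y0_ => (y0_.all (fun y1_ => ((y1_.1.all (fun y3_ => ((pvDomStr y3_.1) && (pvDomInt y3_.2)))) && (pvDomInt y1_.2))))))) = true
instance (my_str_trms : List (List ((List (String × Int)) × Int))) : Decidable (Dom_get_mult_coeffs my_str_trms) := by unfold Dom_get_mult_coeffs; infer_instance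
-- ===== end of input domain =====

-- B replaces A's linear recursion for powers by an iterative accumulator and splits term
-- multiplication into a pairwise-product phase followed by an aggregation fold, building each
-- group's result from a precomputed list of powers (objective: alternative decomposition,
-- identical multiplication nesting and dict order).

-- ===== PORT A =====
-- str_mult: sort the combined word lists and rejoin with spaces
def str_mult (a b : String) : String :=
  PySem.Str.join " " (PySem.List.sorted (PySem.Str.split₀ a ++ PySem.Str.split₀ b) (fun x => x) false)

-- terms_mult: nested loops over both dicts' keys, accumulating coefficient products
def terms_mult (T_1 T_2 : PySem.Dict String Int) : PySem.Dict String Int :=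
  T_1.keys.foldl (fun acc i =>
    T_2.keys.foldl (fun acc2 j =>
      let my_key := str_mult i j
      if acc2.contains my_key then
        acc2.insert my_key (acc2.getD my_key 0 + T_1.getD i 0 * T_2.getD j 0)
      else
        acc2.insert my_key (T_1.getD i 0 * T_2.getD j 0)) acc) PySem.Dict.empty

-- get_pwr_N: Python recurses on n; it terminates only for n ≥ 1 (Pre_ requires this),
-- so the port recurses on n.toNat, exact for n ≥ 1.
def get_pwr_N_nat (T1 : PySem.Dict String Int) : Nat → PySem.Dict String Int
  | 0 => T1
  | 1 => T1
  | (m+2) => terms_mult (get_pwr_N_nat T1 (m+1)) T1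

def get_pwr_N (T1 : PySem.Dict String Int) (n : Int) : PySem.Dict String Int :=
  get_pwr_N_nat T1 n.toNat

-- driver: the index loop 'for j in range(len(...))' with its 'if j == 0' is carried as a
-- fold with an explicit position counter; input assoc lists become dicts via Dict.ofList.
def get_mult_coeffs (my_str_trms : List (List ((List (String × Int)) × Int))) : List (List (String × Int)) :=
  my_str_trms.foldl (fun mult_terms grp =>
    let tem_dic :=
      (grp.foldl (fun (st : PySem.Dict String Int × Nat) p =>
          (if st.2 = 0 then get_pwr_N (PySem.Dict.ofList p.1) p.2
           else terms_mult st.1 (get_pwr_N (PySem.Dict.ofList p.1) p.2), st.2 + 1))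
        (PySem.Dict.empty, 0)).1
    mult_terms ++ [tem_dic.items]) []

-- ===== PORT B =====
-- _mul: build all pairwise (key, coefficient-product) pairs, then aggregate them into a dict
def pv_mulB (T1 T2 : PySem.Dict String Int) : PySem.Dict String Int :=
  (T1.items.flatMap (fun p => T2.items.map (fun q =>
      (PySem.Str.join " " (PySem.List.sorted (PySem.Str.split₀ p.1 ++ PySem.Str.split₀ q.1) (fun x => x) false),
       p.2 * q.2)))).foldl
    (fun out kv => out.insert kv.1 (out.getD kv.1 0 + kv.2)) PySem.Dict.empty

-- _pow: iterative accumulator, n-1 multiplications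
def pv_powB (d : PySem.Dict String Int) (n : Int) : PySem.Dict String Int :=
  (List.range (n - 1).toNat).foldl (fun acc _ => pv_mulB acc d) d

-- per group: list of powers first, then a left fold of _mul over it
def pv_groupB (grp : List ((List (String × Int)) × Int)) : PySem.Dict String Int :=
  let powers := grp.map (fun p => pv_powB (PySem.Dict.ofList p.1) p.2)
  match powers with
  | [] => PySem.Dict.empty
  | h :: t => t.foldl pv_mulB h

def get_mult_coeffs_alt (my_str_trms : List (List ((List (String × Int)) × Int))) : List (List (String × Int)) :=
  my_str_trms.map (fun grp => (pv_groupB grp).items)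

-- ===== PRECONDITION & SPEC =====
-- Pre_ excludes inputs containing a power n ≤ 0, on which A's get_pwr_N recursion never
-- terminates (Python raises RecursionError); A returns on every input with all powers ≥ 1.
def Pre_get_mult_coeffs (my_str_trms : List (List ((List (String × Int)) × Int))) : Prop :=
  ∀ grp ∈ my_str_trms, ∀ p ∈ grp, 1 ≤ p.2
instance (my_str_trms : List (List ((List (String × Int)) × Int))) : Decidable (Pre_get_mult_coeffs my_str_trms) := by unfold Pre_get_mult_coeffs; infer_instance

def pvWitness_get_mult_coeffs : (List (List ((List (String × Int)) × Int))) :=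
  [[([("x", 2), ("y", 3)], 2), ([("x y", 1)], 1)], []]

def Spec_get_mult_coeffs (my_str_trms : List (List ((List (String × Int)) × Int))) (out : List (List (String × Int))) : Prop := out = get_mult_coeffs_alt my_str_trms
instance (my_str_trms : List (List ((List (String × Int)) × Int))) (out : List (List (String × Int))) : Decidable (Spec_get_mult_coeffs my_str_trms out) := by unfold Spec_get_mult_coeffs; infer_instance

-- ===== CLAIM (what is proved, stated in full; the proofs are below) =====
def Claim_equal_get_mult_coeffs : Prop := ∀ (my_str_trms : List (List ((List (String × Int)) × Int))), Dom_get_mult_coeffs my_str_trms → Pre_get_mult_coeffs my_str_trms → Spec_get_mult_coeffs my_str_trms (get_mult_coeffs my_str_trms)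


-- ===== LEMMAS AND PROOFS =====

theorem nodup_keys_mulB (T1 T2 : PySem.Dict String Int) : (pv_mulB T1 T2).keys.Nodup := by
  unfold pv_mulB
  exact PySem.Dict.nodup_keys_foldl_insert_key _ Prod.fst _ _ PySem.Dict.nodup_keys_empty

theorem stepA_eq (acc : PySem.Dict String Int) (k : String) (v : Int) :
    (if acc.contains k then acc.insert k (acc.getD k 0 + v) else acc.insert k v)
    = acc.insert k (acc.getD k 0 + v) := by
  by_cases h : acc.contains k = true
  · simp [h]
  · rw [PySem.Dict.getD_of_not_contains (h := by simpa using h), zero_add]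
    simp [h]

theorem foldl_flatMap_nested {α β γ : Type} (l : List α) (g : α → List β)
    (F : γ → β → γ) (init : γ) :
    (l.flatMap g).foldl F init = l.foldl (fun acc x => (g x).foldl F acc) init := by
  induction l generalizing init with
  | nil => rfl
  | cons a t ih => simp [List.flatMap_cons, List.foldl_append, ih]

theorem terms_mult_eq_mulB (T1 T2 : PySem.Dict String Int)
    (h1 : T1.keys.Nodup) (h2 : T2.keys.Nodup) :
    terms_mult T1 T2 = pv_mulB T1 T2 := by
  unfold terms_mult pv_mulB str_mult
  rw [PySem.Dict.items_eq_map_keys T1 h1 0, PySem.Dict.items_eq_map_keys T2 h2 0,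
      List.flatMap_map, foldl_flatMap_nested]
  simp only [List.foldl_map, stepA_eq]

theorem nodup_keys_powfold (d : PySem.Dict String Int) (h : d.keys.Nodup) (m : Nat) :
    ((List.range m).foldl (fun acc _ => pv_mulB acc d) d).keys.Nodup := by
  induction m with
  | zero => simpa using h
  | succ m ih => simp [List.range_succ, nodup_keys_mulB]

theorem pwr_eq (d : PySem.Dict String Int) (h : d.keys.Nodup) (m : Nat) :
    get_pwr_N_nat d (m + 1) = (List.range m).foldl (fun acc _ => pv_mulB acc d) d := by
  induction m with
  | zero => rfl
  | succ m ih =>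
    show terms_mult (get_pwr_N_nat d (m + 1)) d = _
    rw [ih, List.range_succ, List.foldl_append]
    exact terms_mult_eq_mulB _ _ (nodup_keys_powfold d h m) h

theorem pwr_eq_int (d : PySem.Dict String Int) (h : d.keys.Nodup) (n : Int) (hn : 1 ≤ n) :
    get_pwr_N d n = pv_powB d n := by
  unfold get_pwr_N pv_powB
  have : n.toNat = (n - 1).toNat + 1 := by omega
  rw [this]
  exact pwr_eq d h _

theorem nodup_keys_powB (d : PySem.Dict String Int) (h : d.keys.Nodup) (n : Int) :
    (pv_powB d n).keys.Nodup :=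
  nodup_keys_powfold d h (n - 1).toNat

theorem counter_fold (t : List ((List (String × Int)) × Int))
    (acc : PySem.Dict String Int) (k : Nat) :
    (t.foldl (fun (st : PySem.Dict String Int × Nat) p =>
        (if st.2 = 0 then get_pwr_N (PySem.Dict.ofList p.1) p.2
         else terms_mult st.1 (get_pwr_N (PySem.Dict.ofList p.1) p.2), st.2 + 1))
      (acc, k + 1)).1
    = t.foldl (fun a q => terms_mult a (get_pwr_N (PySem.Dict.ofList q.1) q.2)) acc := by
  induction t generalizing acc k with
  | nil => rfl
  | cons q t ih => simpa using ih (terms_mult acc (get_pwr_N (PySem.Dict.ofList q.1) q.2)) (k + 1)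

theorem tail_fold_eq (t : List ((List (String × Int)) × Int))
    (acc : PySem.Dict String Int) (hacc : acc.keys.Nodup)
    (hp : ∀ p ∈ t, 1 ≤ p.2) :
    t.foldl (fun a q => terms_mult a (get_pwr_N (PySem.Dict.ofList q.1) q.2)) acc
    = t.foldl (fun a q => pv_mulB a (pv_powB (PySem.Dict.ofList q.1) q.2)) acc := by
  induction t generalizing acc with
  | nil => rfl
  | cons q t ih =>
    have hq : 1 ≤ q.2 := hp q (List.mem_cons_self)
    have hnd := PySem.Dict.nodup_keys_ofList (ps := q.1)
    simp only [List.foldl_cons]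
    rw [pwr_eq_int _ hnd _ hq, terms_mult_eq_mulB _ _ hacc (nodup_keys_powB _ hnd _)]
    exact ih _ (nodup_keys_mulB _ _) (fun p hpm => hp p (List.mem_cons_of_mem _ hpm))

theorem group_eq (grp : List ((List (String × Int)) × Int)) (hp : ∀ p ∈ grp, 1 ≤ p.2) :
    (grp.foldl (fun (st : PySem.Dict String Int × Nat) p =>
        (if st.2 = 0 then get_pwr_N (PySem.Dict.ofList p.1) p.2
         else terms_mult st.1 (get_pwr_N (PySem.Dict.ofList p.1) p.2), st.2 + 1))
      (PySem.Dict.empty, 0)).1 = pv_groupB grp := by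
  cases grp with
  | nil => rfl
  | cons p t =>
    have hnd := PySem.Dict.nodup_keys_ofList (ps := p.1)
    have hp1 : 1 ≤ p.2 := hp p (List.mem_cons_self)
    simp only [List.foldl_cons]
    rw [counter_fold, pv_groupB, List.map_cons]
    simp only [List.foldl_map]
    rw [← pwr_eq_int _ hnd _ hp1]
    exact tail_fold_eq t _ (by rw [pwr_eq_int _ hnd _ hp1]; exact nodup_keys_powB _ hnd _)
      (fun q hq => hp q (List.mem_cons_of_mem _ hq))

-- ===== VERDICT (by name: the statement is the Claim_ definition above) =====
theorem get_mult_coeffs_spec : Claim_equal_get_mult_coeffs := by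
  intro l _ hpre
  unfold Spec_get_mult_coeffs get_mult_coeffs get_mult_coeffs_alt
  rw [PySem.List.foldl_append_singleton_eq_map]
  refine List.map_congr_left (fun grp hg => ?_)
  rw [group_eq grp (fun p hp => hpre grp hg p hp)]
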